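-- pv_equiv track=rewrite | github.com/Jaheay/starfield-outpost-data | find_outposts.py | compute_main_group_shared_resources
-- ===== SOURCE A (Python) =====
-- def compute_main_group_shared_resources(groups):
--     main_group_shared_resources = {}
--     for group_name, resources in groups["inorganic"].items():
--         main_group_name = group_name.split("-")[0]
--         resources_set = set(resources)
--         if main_group_name not in main_group_shared_resources:
--             main_group_shared_resources[main_group_name] = resources_set.copy()
--         else:
--             main_group_shared_resources[main_group_name] &= resources_set
--     return main_group_shared_resources
-- ===== SOURCE B (Python) =====
-- def compute_main_group_shared_resources(groups):
--     inorganic = groups["inorganic"]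
--     # pass 1: distinct main-group prefixes in first-appearance order
--     prefixes = list(dict.fromkeys(name.split("-")[0] for name in inorganic))
--     # pass 2: for each prefix, intersect the resource sets of its groups
--     result = {}
--     for prefix in prefixes:
--         sets = [set(r) for name, r in inorganic.items() if name.split("-")[0] == prefix]
--         shared = sets[0]
--         for s in sets[1:]:
--             shared = shared & s
--         result[prefix] = shared
--     return result
-- ===== Notes on version B (the rewrite author's own statement) =====
-- stated objective: alternative
-- what changed: A builds the result in one incremental pass, intersecting into a dict of running sets; B first collects the distinct main-group prefixes, then computes each prefix's shared set directly by filtering and intersecting that prefix's resource sets in a second phase.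
import Mathlib
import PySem

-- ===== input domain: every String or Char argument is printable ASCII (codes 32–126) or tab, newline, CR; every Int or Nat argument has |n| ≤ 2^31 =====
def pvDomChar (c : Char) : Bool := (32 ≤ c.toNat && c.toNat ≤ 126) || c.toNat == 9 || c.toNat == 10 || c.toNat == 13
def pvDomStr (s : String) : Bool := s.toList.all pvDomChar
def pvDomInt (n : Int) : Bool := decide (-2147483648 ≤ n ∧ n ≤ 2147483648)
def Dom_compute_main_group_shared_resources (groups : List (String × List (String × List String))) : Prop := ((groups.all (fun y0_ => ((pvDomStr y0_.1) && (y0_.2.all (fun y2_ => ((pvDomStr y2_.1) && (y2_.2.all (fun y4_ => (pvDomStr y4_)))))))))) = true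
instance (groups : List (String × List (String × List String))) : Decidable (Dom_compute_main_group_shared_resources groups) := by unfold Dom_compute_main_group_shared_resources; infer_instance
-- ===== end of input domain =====

-- B replaces A's incremental dict of running intersections by two plain passes:
-- collect the distinct main-group prefixes, then intersect each prefix's resource
-- sets directly (objective: alternative decomposition, no speed claim).
-- group_name.split("-")[0]: split with a nonempty separator is never empty, so headD is exact
def pvPrefix (s : String) : String := ((PySem.Str.split? s "-").getD []).headD ""

-- ===== PORT A =====
def compute_main_group_shared_resources (groups : List (String × List (String × List String))) : List (String × List String) :=
  match groups.find? (fun p => p.1 == "inorganic") with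
  | none => []  -- Python raises KeyError here; excluded by Pre_
  | some inorg =>
    (inorg.2.foldl (fun (d : PySem.Dict String (PySem.Set String)) gr =>
        let mgn := pvPrefix gr.1
        let rs := PySem.Set.ofList gr.2
        if !(d.contains mgn) then d.insert mgn rs
        else d.insert mgn (PySem.Set.inter (d.getD mgn PySem.Set.empty) rs))
      PySem.Dict.empty).items

-- ===== PORT B =====
def compute_main_group_shared_resources_alt (groups : List (String × List (String × List String))) : List (String × List String) :=
  match groups.find? (fun p => p.1 == "inorganic") with
  | none => []  -- Python raises KeyError here; excluded by Pre_
  | some inorg =>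
    let prefixes := PySem.List.dedup (inorg.2.map (fun p => pvPrefix p.1))
    (prefixes.foldl (fun (r : PySem.Dict String (PySem.Set String)) pre =>
        r.insert pre
          (match (inorg.2.filter (fun p => pvPrefix p.1 == pre)).map
                   (fun p => PySem.Set.ofList p.2) with
           | [] => PySem.Set.empty
           | s0 :: rest => rest.foldl PySem.Set.inter s0))
      PySem.Dict.empty).items

-- ===== PRECONDITION & SPEC =====
-- Pre_ excludes only the inputs without an "inorganic" key, on which Python A raises KeyError.
def Pre_compute_main_group_shared_resources (groups : List (String × List (String × List String))) : Prop :=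
  "inorganic" ∈ groups.map Prod.fst
instance (groups : List (String × List (String × List String))) : Decidable (Pre_compute_main_group_shared_resources groups) := by unfold Pre_compute_main_group_shared_resources; infer_instance
def pvWitness_compute_main_group_shared_resources : (List (String × List (String × List String))) :=
  [("inorganic", [("Iron-1", ["Fe", "Ni"]), ("Iron-2", ["Fe"])])]
def Spec_compute_main_group_shared_resources (groups : List (String × List (String × List String))) (out : List (String × List String)) : Prop := out = compute_main_group_shared_resources_alt groups
instance (groups : List (String × List (String × List String))) (out : List (String × List String)) : Decidable (Spec_compute_main_group_shared_resources groups out) := by unfold Spec_compute_main_group_shared_resources; infer_instance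

-- ===== CLAIM (what is proved, stated in full; the proofs are below) =====
def Claim_equal_compute_main_group_shared_resources : Prop := ∀ (groups : List (String × List (String × List String))), Dom_compute_main_group_shared_resources groups → Pre_compute_main_group_shared_resources groups → Spec_compute_main_group_shared_resources groups (compute_main_group_shared_resources groups)

-- ===== LEMMAS AND PROOFS =====

def pvKey (p : String × List String) : String := pvPrefix p.1

def pvFA (d : PySem.Dict String (PySem.Set String)) (x : String × List String) : PySem.Set String :=
  if !(d.contains (pvKey x)) then PySem.Set.ofList x.2
  else PySem.Set.inter (d.getD (pvKey x) PySem.Set.empty) (PySem.Set.ofList x.2)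

-- A's loop step in the uniform "insert at key" shape the PySem dict lemmas expect
theorem stepA_eq :
    (fun (d : PySem.Dict String (PySem.Set String)) (gr : String × List String) =>
        let mgn := pvPrefix gr.1
        let rs := PySem.Set.ofList gr.2
        if !(d.contains mgn) then d.insert mgn rs
        else d.insert mgn (PySem.Set.inter (d.getD mgn PySem.Set.empty) rs))
    = (fun d x => d.insert (pvKey x) (pvFA d x)) := by
  funext d x
  simp only [pvKey]
  by_cases h : d.contains (pvPrefix x.1) <;> simp [pvFA, pvKey, h]

-- collapse of one prefix's list of sets
def pvCollapse (sets : List (PySem.Set String)) : Option (PySem.Set String) :=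
  match sets with
  | [] => none
  | s0 :: rest => some (rest.foldl PySem.Set.inter s0)

theorem pvCollapse_append (sets : List (PySem.Set String)) (s : PySem.Set String) :
    pvCollapse (sets ++ [s]) =
      some (match pvCollapse sets with
            | none => s
            | some t => PySem.Set.inter t s) := by
  cases sets with
  | nil => rfl
  | cons s0 rest => simp [pvCollapse, List.foldl_append]

theorem step_get? (d : PySem.Dict String (PySem.Set String)) (x : String × List String) (k : String) :
    ((d.insert (pvKey x) (pvFA d x)).get? k)
      = if k = pvKey x then
          some (match d.get? (pvKey x) with
                | none => PySem.Set.ofList x.2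
                | some t => PySem.Set.inter t (PySem.Set.ofList x.2))
        else d.get? k := by
  rw [PySem.Dict.get?_insert]
  by_cases hk : k = pvKey x
  · rw [if_pos hk, if_pos hk]
    unfold pvFA
    rw [PySem.Dict.contains_eq_isSome_get?, PySem.Dict.getD_eq_get?_getD]
    cases d.get? (pvKey x) <;> simp
  · rw [if_neg hk, if_neg hk]

theorem get?_AF (l : List (String × List String)) (k : String) :
    ((l.foldl (fun d x => d.insert (pvKey x) (pvFA d x)) PySem.Dict.empty).get? k)
      = pvCollapse ((l.filter (fun p => pvPrefix p.1 == k)).map (fun p => PySem.Set.ofList p.2)) := by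
  induction l using List.reverseRecOn with
  | nil => simp [pvCollapse, PySem.Dict.get?_empty]
  | append_singleton l x ih =>
    rw [List.foldl_append, List.foldl_cons, List.foldl_nil, step_get?, List.filter_append]
    by_cases hk : k = pvKey x
    · subst hk
      rw [if_pos rfl, ih]
      have hx : (pvPrefix x.1 == pvKey x) = true := by simp [pvKey]
      simp only [List.filter_cons, List.filter_nil, hx, if_pos, List.map_append, List.map_cons,
        List.map_nil, pvCollapse_append]
    · have hx : (pvPrefix x.1 == k) = false := by
        simp only [pvKey] at hk
        simpa using fun h => hk (h.symm)
      rw [if_neg hk, ih]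
      simp [hx]

def pvVB (l : List (String × List String)) (pre : String) : PySem.Set String :=
  match (l.filter (fun p => pvPrefix p.1 == pre)).map (fun p => PySem.Set.ofList p.2) with
  | [] => PySem.Set.empty
  | s0 :: rest => rest.foldl PySem.Set.inter s0

theorem main_eq (l : List (String × List String)) :
    ((l.foldl (fun (d : PySem.Dict String (PySem.Set String)) gr =>
        let mgn := pvPrefix gr.1
        let rs := PySem.Set.ofList gr.2
        if !(d.contains mgn) then d.insert mgn rs
        else d.insert mgn (PySem.Set.inter (d.getD mgn PySem.Set.empty) rs))
      PySem.Dict.empty).items)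
    = ((PySem.List.dedup (l.map (fun p => pvPrefix p.1))).foldl
        (fun (r : PySem.Dict String (PySem.Set String)) pre =>
          r.insert pre
            (match (l.filter (fun p => pvPrefix p.1 == pre)).map
                     (fun p => PySem.Set.ofList p.2) with
             | [] => PySem.Set.empty
             | s0 :: rest => rest.foldl PySem.Set.inter s0))
        PySem.Dict.empty).items := by
  rw [stepA_eq]
  have hB : (fun (r : PySem.Dict String (PySem.Set String)) pre =>
          r.insert pre
            (match (l.filter (fun p => pvPrefix p.1 == pre)).map
                     (fun p => PySem.Set.ofList p.2) with
             | [] => PySem.Set.empty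
             | s0 :: rest => rest.foldl PySem.Set.inter s0))
      = (fun (r : PySem.Dict String (PySem.Set String)) pre => r.insert pre (pvVB l pre)) := rfl
  rw [hB]
  have hnodup : ((l.foldl (fun d x => d.insert (pvKey x) (pvFA d x)) PySem.Dict.empty).keys).Nodup :=
    PySem.Dict.nodup_keys_foldl_insert_key l pvKey pvFA PySem.Dict.empty (by simp [PySem.Dict.keys_empty])
  have hkeys : ((l.foldl (fun d x => d.insert (pvKey x) (pvFA d x)) PySem.Dict.empty).keys)
      = PySem.Set.ofList (l.map pvKey) := by
    rw [PySem.Dict.keys_foldl_insert_key]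
    simp [PySem.Dict.keys_empty, PySem.Set.update_nil_left]
  have hmapkey : l.map (fun p => pvPrefix p.1) = l.map pvKey := rfl
  rw [PySem.Dict.items_eq_map_keys _ hnodup PySem.Set.empty, hkeys,
    PySem.List.dedup_eq_ofList, hmapkey]
  rw [PySem.Dict.items_foldl_insert_fresh (PySem.Set.ofList (l.map pvKey)) (fun a => a)
    (pvVB l) PySem.Dict.empty
    (fun a _ => PySem.Dict.contains_empty a)
    (by simp [PySem.Set.nodup_ofList])]
  simp only [show (PySem.Dict.empty : PySem.Dict String (PySem.Set String)).items = [] from rfl,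
    List.nil_append]
  refine List.map_congr_left (fun k hk => ?_)
  have hk' : k ∈ l.map pvKey := (PySem.Set.mem_ofList _ _).mp hk
  obtain ⟨p, hp, hpk⟩ := List.mem_map.mp hk'
  have hpf : p ∈ l.filter (fun q => pvPrefix q.1 == k) := by
    refine List.mem_filter.mpr ⟨hp, ?_⟩
    simp [pvKey] at hpk
    simp [hpk]
  cases hm : (l.filter (fun q => pvPrefix q.1 == k)).map (fun q => PySem.Set.ofList q.2) with
  | nil =>
    exfalso
    have hfe : (l.filter (fun q => pvPrefix q.1 == k)) = [] := by
      cases hf2 : l.filter (fun q => pvPrefix q.1 == k) with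
      | nil => rfl
      | cons a as => rw [hf2] at hm; simp at hm
    rw [hfe] at hpf; simp at hpf
  | cons s0 rest =>
    rw [PySem.Dict.getD_eq_get?_getD, get?_AF, hm]
    simp only [pvVB, hm, pvCollapse, Option.getD_some]

-- ===== VERDICT (by name: the statement is the Claim_ definition above) =====
theorem compute_main_group_shared_resources_spec : Claim_equal_compute_main_group_shared_resources := by
  intro groups _ hpre
  unfold Spec_compute_main_group_shared_resources
  unfold compute_main_group_shared_resources compute_main_group_shared_resources_alt
  cases hf : groups.find? (fun p => p.1 == "inorganic") with
  | none =>
    exfalso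
    obtain ⟨p, hp, hpk⟩ := List.mem_map.mp hpre
    have : ∃ x ∈ groups, (fun q => q.1 == "inorganic") x := ⟨p, hp, by simp [hpk]⟩
    have := List.find?_isSome.mpr this
    simp [hf] at this
  | some inorg =>
    simpa using main_eq inorg.2
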